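-- pv_equiv track=rewrite | github.com/oPisiti/Advent-Of-Code | 2023/13/13+.py | diff_is_one
-- ===== SOURCE A (Python) =====
-- def diff_is_one(mirror: list[int], l: int, r: int, horizontal: bool) -> bool:
--     i_l, i_r = l, r
--
--     max_i = len(mirror) if horizontal else len(mirror[0])
--
--     for i_l in range(max_i):
--         for i_r in range(i_l + 1, max_i):
--             if horizontal:
--                 if mirror[i_l] != mirror[i_r]:
--                     # Calculating the difference in strings
--                     diff = 0
--                     for k in range(len(mirror[i_l])):
--                         if mirror[i_l][k] != mirror[i_r][k]:
--                             diff += 1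
--
--                     if diff == 1: return True
--                     return False
--
--             else:
--                 v_l_str = "".join([s[i_l] for s in mirror])
--                 v_r_str = "".join([s[i_r] for s in mirror])
--                 if v_l_str != v_r_str:
--                     # Calculating the difference in strings
--                     diff = 0
--                     for k in range(len(v_l_str)):
--                         if v_l_str[k] != v_r_str[k]:
--                             diff += 1
--
--                     if diff == 1: return True
--                     return False
--
--     return False
-- ===== SOURCE B (Python) =====
-- def diff_is_one(mirror: list[int], l: int, r: int, horizontal: bool) -> bool:
--     # The first differing pair in lexicographic pair order is always (0, j0),
--     # where j0 is the first line differing from line 0; if no line differs,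
--     # all lines are equal and every pair agrees.  So one pass suffices.
--     lines = list(mirror) if horizontal else ["".join(col) for col in zip(*mirror)]
--     if not lines:
--         return False
--     first = lines[0]
--     for line in lines[1:]:
--         if line != first:
--             return sum(x != y for x, y in zip(first, line)) == 1
--     return False
-- ===== Notes on version B (the rewrite author's own statement) =====
-- stated objective: simpler
-- what changed: Replaces the nested all-pairs scan (which re-joins both column strings for every pair in the vertical case) by precomputing the lines once (rows, or the zip-transposed columns) and a single pass comparing each line to line 0, since the lexicographically first differing pair is always (0, j0); the char-diff count becomes a zip sum.
import Mathlib
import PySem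

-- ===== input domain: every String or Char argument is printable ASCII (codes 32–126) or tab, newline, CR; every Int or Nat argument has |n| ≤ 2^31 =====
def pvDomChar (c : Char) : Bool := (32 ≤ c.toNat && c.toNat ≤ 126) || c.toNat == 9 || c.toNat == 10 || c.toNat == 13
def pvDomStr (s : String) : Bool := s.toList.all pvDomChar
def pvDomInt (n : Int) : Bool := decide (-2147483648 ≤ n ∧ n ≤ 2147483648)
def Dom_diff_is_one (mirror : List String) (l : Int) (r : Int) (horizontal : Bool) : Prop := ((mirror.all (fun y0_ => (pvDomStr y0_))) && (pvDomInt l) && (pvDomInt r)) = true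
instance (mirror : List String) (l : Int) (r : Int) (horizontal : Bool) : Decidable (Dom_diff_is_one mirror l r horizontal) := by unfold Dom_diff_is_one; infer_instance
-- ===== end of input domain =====

-- B replaces A's nested all-pairs scan by a single pass comparing each line to line 0
-- (the lexicographically first differing pair is always (0, j0)), with the columns
-- precomputed once by a zip-style transpose; objective: simpler.

-- ===== PORT A =====
-- one column string, "".join([s[i] for s in mirror]) (indices in range on admitted inputs)
def pvCol (rows : List (List Char)) (i : Nat) : List Char :=
  rows.map (fun row => row.getD i ' ')

-- A's char-diff loop: for k in range(len(a)): if a[k] != b[k]: diff += 1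
def pvDiffA (a b : List Char) : Nat :=
  (List.range a.length).foldl (fun d k => if a.getD k ' ' ≠ b.getD k ' ' then d + 1 else d) 0

-- A's inner-loop body at one pair: 'if lines differ: return (diff == 1)' as Option
def pvCheckA (a b : List Char) : Option Bool :=
  if a ≠ b then some (pvDiffA a b == 1) else none

-- A's two nested index loops with early return, on the rows as char lists
def pvScanA (rows : List (List Char)) (horizontal : Bool) : Bool :=
  let max_i : Nat := if horizontal then rows.length else (rows.headD []).length
  match (List.range max_i).findSome? (fun i_l =>
      (List.range' (i_l + 1) (max_i - (i_l + 1))).findSome? (fun i_r =>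
        if horizontal then pvCheckA (rows.getD i_l []) (rows.getD i_r [])
        else pvCheckA (pvCol rows i_l) (pvCol rows i_r))) with
  | some b => b
  | none => false

def diff_is_one (mirror : List String) (l : Int) (r : Int) (horizontal : Bool) : Bool :=
  pvScanA (mirror.map String.toList) horizontal

-- ===== PORT B =====
-- sum(x != y for x, y in zip(a, b)) of Source B
def pvDiffB (a b : List Char) : Nat :=
  (a.zip b).countP (fun p => p.1 != p.2)

-- Source B on the rows as char lists: precompute the lines, then one pass against lines[0]
def pvScanB (rows : List (List Char)) (horizontal : Bool) : Bool :=
  let lines : List (List Char) :=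
    if horizontal then rows
    else
      -- zip(*mirror): columns, truncated at the shortest row
      let m : Nat := (rows.map List.length).foldr min ((rows.headD []).length)
      (List.range m).map (fun i => pvCol rows i)
  match lines with
  | [] => false
  | first :: rest =>
    match rest.find? (fun line => line != first) with
    | some line => pvDiffB first line == 1
    | none => false

def diff_is_one_alt (mirror : List String) (l : Int) (r : Int) (horizontal : Bool) : Bool :=
  pvScanB (mirror.map String.toList) horizontal

-- ===== PRECONDITION & SPEC =====
-- Pre_ admits exactly the inputs on which the Python A returns (it raises IndexError on all
-- others): horizontally, the first row differing from row 0 — the first pair A inspects —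
-- must not be shorter than row 0; vertically, the mirror must be nonempty and either have
-- at most one column, or be wide enough (row 0 no longer than the shortest row), or contain
-- a differing column before the shortest row ends, so that A returns before indexing past it.
def pvPre (rows : List (List Char)) (horizontal : Bool) : Bool :=
  if horizontal then
    match rows with
    | [] => true
    | h :: t =>
      match t.find? (fun s => s != h) with
      | none => true
      | some s => decide (h.length ≤ s.length)
  else
    match rows with
    | [] => false
    | _ =>
      let w0 := (rows.headD []).length
      let m := (rows.map List.length).foldr min w0
      decide (w0 ≤ 1) || decide (w0 ≤ m) ||
        (List.range' 1 (m - 1)).any (fun j => pvCol rows j != pvCol rows 0)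

def Pre_diff_is_one (mirror : List String) (l : Int) (r : Int) (horizontal : Bool) : Prop :=
  pvPre (mirror.map String.toList) horizontal = true

instance (mirror : List String) (l : Int) (r : Int) (horizontal : Bool) : Decidable (Pre_diff_is_one mirror l r horizontal) := by unfold Pre_diff_is_one; infer_instance

def pvWitness_diff_is_one : List String × Int × Int × Bool := (["ab", "cb"], 0, 0, true)

def Spec_diff_is_one (mirror : List String) (l : Int) (r : Int) (horizontal : Bool) (out : Bool) : Prop := out = diff_is_one_alt mirror l r horizontal
instance (mirror : List String) (l : Int) (r : Int) (horizontal : Bool) (out : Bool) : Decidable (Spec_diff_is_one mirror l r horizontal out) := by unfold Spec_diff_is_one; infer_instance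

-- ===== CLAIM (what is proved, stated in full; the proofs are below) =====
def Claim_equal_diff_is_one : Prop := ∀ (mirror : List String) (l : Int) (r : Int) (horizontal : Bool), Dom_diff_is_one mirror l r horizontal → Pre_diff_is_one mirror l r horizontal → Spec_diff_is_one mirror l r horizontal (diff_is_one mirror l r horizontal)

-- ===== LEMMAS AND PROOFS =====

-- findSome? over a contiguous index range, read through getD of pre ++ suf, is findSome? on suf
theorem pv_findSome_range' (f : List Char → Option Bool) (suf pre : List (List Char)) :
    (List.range' pre.length suf.length).findSome? (fun j => f ((pre ++ suf).getD j [])) =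
      suf.findSome? f := by
  induction suf generalizing pre with
  | nil => simp
  | cons x s ih =>
    rw [List.length_cons, List.range'_succ, List.findSome?_cons]
    have hx : (pre ++ x :: s).getD pre.length [] = x := by
      simp [List.getD_eq_getElem?_getD]
    rw [hx, List.findSome?_cons]
    have := ih (pre ++ [x])
    simp only [List.length_append, List.length_cons, List.length_nil, List.append_assoc,
      List.cons_append, List.nil_append] at this
    rw [Nat.add_comm pre.length 1] at this ⊢
    rw [this]

-- findSome? is congruent on members
theorem pv_findSome_congr {α β : Type} (l : List α) (f g : α → Option β)
    (h : ∀ x ∈ l, f x = g x) : l.findSome? f = l.findSome? g := by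
  induction l with
  | nil => rfl
  | cons x s ih =>
    rw [List.findSome?_cons, List.findSome?_cons, h x (List.mem_cons_self),
      ih (fun y hy => h y (List.mem_cons_of_mem _ hy))]

-- the nested pair scan returns at the first pair (0, j0): it equals the head scan
theorem pv_pairScan_eq_headScan (check : List Char → List Char → Option Bool)
    (hc : ∀ a b, check a b = none ↔ a = b) (lines : List (List Char)) :
    (List.range lines.length).findSome? (fun i_l =>
      (List.range' (i_l + 1) (lines.length - (i_l + 1))).findSome? (fun i_r =>
        check (lines.getD i_l []) (lines.getD i_r []))) =
      (match lines with
       | [] => none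
       | h :: t => t.findSome? (fun b => check h b)) := by
  cases lines with
  | nil => simp
  | cons h t =>
    rw [List.range_eq_range']
    simp only [List.length_cons]
    rw [List.range'_succ, List.findSome?_cons]
    have inner0 : (List.range' (0 + 1) (t.length + 1 - (0 + 1))).findSome?
        (fun i_r => check ((h :: t).getD 0 []) ((h :: t).getD i_r [])) =
        t.findSome? (fun b => check h b) := by
      have := pv_findSome_range' (fun b => check h b) t [h]
      simpa using this
    rw [inner0]
    cases hcase : t.findSome? (fun b => check h b) with
    | some v => rfl
    | none =>
      have hall : ∀ b ∈ t, b = h := by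
        intro b hb
        exact ((hc h b).mp (List.findSome?_eq_none_iff.mp hcase b hb)).symm
      have hgetD : ∀ i, i < (h :: t).length → (h :: t).getD i [] = h := by
        intro i hi
        have hm : (h :: t).getD i [] ∈ h :: t := by
          rw [List.getD_eq_getElem _ _ hi]; exact List.getElem_mem hi
        rcases List.mem_cons.mp hm with h1 | h1
        · exact h1
        · exact hall _ h1
      apply List.findSome?_eq_none_iff.mpr
      intro i hi
      have hi' : i < (h :: t).length := by
        have := List.mem_range'_1.mp hi
        simp only [List.length_cons]
        omega
      apply List.findSome?_eq_none_iff.mpr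
      intro j hj
      have hj' : j < (h :: t).length := by
        have h1 := List.mem_range'_1.mp hj
        have h2 := List.mem_range'_1.mp hi
        simp only [List.length_cons]
        omega
      rw [hgetD i hi', hgetD j hj']
      exact (hc h h).mpr rfl

-- find?/findSome? bridge: A's 'if a ≠ b then some (g b) else none' scan is find? + map
theorem pv_findSome_eq_find_map (h : List Char) (t : List (List Char)) :
    t.findSome? (fun b => pvCheckA h b) =
      (t.find? (fun b => b != h)).map (fun b => pvDiffA h b == 1) := by
  induction t with
  | nil => rfl
  | cons x s ih =>
    by_cases hx : x = h
    · subst hx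
      have h1 : pvCheckA x x = none := by simp [pvCheckA]
      simp [h1, ih]
    · have h1 : pvCheckA h x = some (pvDiffA h x == 1) := by
        simp [pvCheckA, Ne.symm hx]
      have h2 : (x != h) = true := bne_iff_ne.mpr hx
      simp [h1, h2]

-- counting folds shift their accumulator out
theorem pv_foldl_count_shift (p : Nat → Prop) [DecidablePred p] (l : List Nat) :
    ∀ d : Nat, l.foldl (fun d k => if p k then d + 1 else d) d
      = d + l.foldl (fun d k => if p k then d + 1 else d) 0 := by
  induction l with
  | nil => intro d; simp
  | cons k s ih =>
    intro d
    simp only [List.foldl_cons]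
    by_cases hp : p k
    · simp only [if_pos hp]
      rw [ih (d + 1), ih 1]; omega
    · simp only [if_neg hp]
      exact ih d

-- the two diff counters agree when the left line is not longer
theorem pv_diff_eq (a b : List Char) (hl : a.length ≤ b.length) : pvDiffA a b = pvDiffB a b := by
  induction a generalizing b with
  | nil => simp [pvDiffA, pvDiffB]
  | cons x a' ih =>
    cases b with
    | nil => simp at hl
    | cons y b' =>
      have hl' : a'.length ≤ b'.length := by simpa using hl
      have hrec := ih b' hl'
      unfold pvDiffA pvDiffB at hrec ⊢
      rw [List.length_cons, List.range_succ_eq_map, List.foldl_cons, List.foldl_map,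
        List.zip_cons_cons, List.countP_cons]
      simp only [List.getD_cons_succ, List.getD_cons_zero, Nat.succ_eq_add_one]
      rw [pv_foldl_count_shift (fun k => a'.getD k ' ' ≠ b'.getD k ' ')]
      rw [hrec]
      by_cases hxy : x = y <;> simp [hxy, bne_iff_ne] <;> omega

-- pvCheckA is none exactly on equal lines
theorem pv_checkA_none_iff (a b : List Char) : pvCheckA a b = none ↔ a = b := by
  by_cases hab : a = b <;> simp [pvCheckA, hab]

-- columns all have the mirror's height
theorem pv_col_length (rows : List (List Char)) (i : Nat) :
    (pvCol rows i).length = rows.length := by simp [pvCol]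

-- the fold-min is at most its seed
theorem pv_foldr_min_le (w0 : Nat) (l : List Nat) : l.foldr min w0 ≤ w0 := by
  induction l with
  | nil => exact Nat.le_refl _
  | cons x s ih => exact le_trans (min_le_right _ _) ih

-- a range decomposed at its head
theorem pv_range_cons (m : Nat) (hm : 1 ≤ m) :
    List.range m = 0 :: List.range' 1 (m - 1) := by
  rw [List.range_eq_range', show m = (m - 1) + 1 by omega, List.range'_succ]
  simp

-- the head-scan-and-decide shape both programs reduce to, over a tail list of lines
theorem pv_tail_verdict (c0 : List Char) (tail : List (List Char))
    (hlen : ∀ s ∈ tail, s ≠ c0 → c0.length ≤ s.length) :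
    (match (tail.find? (fun b => b != c0)).map (fun b => pvDiffA c0 b == 1) with
     | some v => v
     | none => false) =
    (match tail.find? (fun line => line != c0) with
     | some line => pvDiffB c0 line == 1
     | none => false) := by
  cases hf : tail.find? (fun b => b != c0) with
  | none => rfl
  | some s =>
    have hs : s ∈ tail := List.mem_of_find?_eq_some hf
    have hne : s ≠ c0 := bne_iff_ne.mp (List.find?_some (p := fun b => b != c0) hf)
    simp [pv_diff_eq c0 s (hlen s hs hne)]

-- A's vertical branch reduced to a find? over the first w0 - 1 real column lists
theorem pv_scanA_false (rows : List (List Char)) :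
    pvScanA rows false =
      (match ((List.range' 1 ((rows.headD []).length - 1)).map (pvCol rows)).find?
          (fun b => b != pvCol rows 0) |>.map (fun b => pvDiffA (pvCol rows 0) b == 1) with
       | some v => v
       | none => false) := by
  unfold pvScanA
  simp only [Bool.false_eq_true, if_false]
  have hcongr : (List.range (rows.headD []).length).findSome? (fun i_l =>
      (List.range' (i_l + 1) ((rows.headD []).length - (i_l + 1))).findSome? (fun i_r =>
        pvCheckA (pvCol rows i_l) (pvCol rows i_r))) =
      (List.range (((List.range (rows.headD []).length).map (pvCol rows)).length)).findSome?
        (fun i_l =>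
        (List.range' (i_l + 1) ((((List.range (rows.headD []).length).map (pvCol rows)).length) - (i_l + 1))).findSome? (fun i_r =>
          pvCheckA (((List.range (rows.headD []).length).map (pvCol rows)).getD i_l [])
            (((List.range (rows.headD []).length).map (pvCol rows)).getD i_r []))) := by
    simp only [List.length_map, List.length_range]
    apply pv_findSome_congr
    intro i hi
    have hi' : i < (rows.headD []).length := List.mem_range.mp hi
    apply pv_findSome_congr
    intro j hj
    have hj' : j < (rows.headD []).length := by
      have := List.mem_range'_1.mp hj
      omega
    rw [PySem.List.getD_map_range _ _ _ _ hi', PySem.List.getD_map_range _ _ _ _ hj']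
  rw [hcongr, pv_pairScan_eq_headScan pvCheckA pv_checkA_none_iff]
  by_cases hw : 1 ≤ (rows.headD []).length
  · rw [pv_range_cons _ hw, List.map_cons]
    have hred : (match pvCol rows 0 :: (List.range' 1 ((rows.headD []).length - 1)).map (pvCol rows) with
        | [] => (none : Option Bool)
        | h :: t => t.findSome? (fun b => pvCheckA h b))
      = ((List.range' 1 ((rows.headD []).length - 1)).map (pvCol rows)).findSome?
          (fun b => pvCheckA (pvCol rows 0) b) := rfl
    rw [hred, pv_findSome_eq_find_map]
  · have hw0 : (rows.headD []).length = 0 := by omega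
    rw [hw0]
    simp
  
-- B's vertical branch reduced to the same find? over the first m - 1 column lists
theorem pv_scanB_false (rows : List (List Char)) :
    pvScanB rows false =
      (match ((List.range' 1 (((rows.map List.length).foldr min ((rows.headD []).length)) - 1)).map
          (pvCol rows)).find? (fun line => line != pvCol rows 0) with
       | some line => pvDiffB (pvCol rows 0) line == 1
       | none => false) := by
  unfold pvScanB
  simp only [Bool.false_eq_true, if_false]
  by_cases hm : 1 ≤ (rows.map List.length).foldr min ((rows.headD []).length)
  · rw [pv_range_cons _ hm, List.map_cons]
  · have hm0 : (rows.map List.length).foldr min ((rows.headD []).length) = 0 := by omega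
    rw [hm0]
    simp

-- columns never exceed each other in length
theorem pv_col_hlen (rows : List (List Char)) (k : Nat) :
    ∀ s ∈ (List.range' 1 k).map (pvCol rows), s ≠ pvCol rows 0 →
      (pvCol rows 0).length ≤ s.length := by
  intro s hs _
  rcases List.mem_map.mp hs with ⟨j, _, rfl⟩
  simp [pv_col_length]

-- the core equivalence, on the rows as char lists
theorem pv_main (rows : List (List Char)) (horizontal : Bool)
    (hpre : pvPre rows horizontal = true) : pvScanA rows horizontal = pvScanB rows horizontal := by
  cases horizontal with
  | true =>
    unfold pvScanA pvScanB
    simp only [if_true]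
    rw [pv_pairScan_eq_headScan pvCheckA pv_checkA_none_iff rows]
    cases rows with
    | nil => rfl
    | cons h t =>
      have hred : (match h :: t with
          | [] => (none : Option Bool)
          | h :: t => t.findSome? (fun b => pvCheckA h b)) = t.findSome? (fun b => pvCheckA h b) := rfl
      rw [hred, pv_findSome_eq_find_map]
      cases hf : t.find? (fun s => s != h) with
      | none => simp [hf]
      | some s =>
        have hlen : h.length ≤ s.length := by simpa [pvPre, hf] using hpre
        simp [hf, pv_diff_eq h s hlen]
  | false =>
    rw [pv_scanA_false, pv_scanB_false]
    cases rows with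
    | nil => simp [pvPre] at hpre
    | cons r0 rs =>
      have hmle' : List.foldr min r0.length (rs.map List.length) ≤ r0.length :=
        pv_foldr_min_le _ _
      have hmin : min r0.length (List.foldr min r0.length (rs.map List.length))
          = List.foldr min r0.length (rs.map List.length) := min_eq_right hmle'
      have hpre' : (r0.length ≤ 1 ∨ r0.length ≤ List.foldr min r0.length (List.map List.length rs)) ∨
          ∃ x, (1 ≤ x ∧ x < 1 + (min r0.length (List.foldr min r0.length (List.map List.length rs)) - 1)) ∧
            ¬pvCol (r0 :: rs) x = pvCol (r0 :: rs) 0 := by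
        simpa [pvPre] using hpre
      simp only [List.headD_cons, List.map_cons, List.foldr_cons]
      rw [hmin]
      rcases hpre' with (hcase | hcase) | hcase
      · -- at most one column: both tails are empty
        have h1 : r0.length - 1 = 0 := by omega
        have h2 : List.foldr min r0.length (rs.map List.length) - 1 = 0 := by omega
        rw [h1, h2]
        rfl
      · -- full width: the two tails coincide
        have hmeq : List.foldr min r0.length (rs.map List.length) = r0.length := by omega
        rw [hmeq]
        exact pv_tail_verdict _ _ (pv_col_hlen _ _)
      · -- a differing column before the shortest row ends: both return at the same column
        obtain ⟨j, ⟨hj1, hj2⟩, hjne⟩ := hcase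
        rw [hmin] at hj2
        have hm2 : 2 ≤ List.foldr min r0.length (rs.map List.length) := by omega
        have hjmem : j ∈ List.range' 1 (List.foldr min r0.length (rs.map List.length) - 1) :=
          List.mem_range'_1.mpr ⟨hj1, by omega⟩
        have hsplit : List.range' 1 (r0.length - 1) =
            List.range' 1 (List.foldr min r0.length (rs.map List.length) - 1) ++
              List.range' (List.foldr min r0.length (rs.map List.length))
                (r0.length - List.foldr min r0.length (rs.map List.length)) := by
          have h := List.range'_append_1 (s := 1)
            (m := List.foldr min r0.length (rs.map List.length) - 1)
            (n := r0.length - List.foldr min r0.length (rs.map List.length))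
          rw [show 1 + (List.foldr min r0.length (rs.map List.length) - 1)
              = List.foldr min r0.length (rs.map List.length) by omega,
            show (List.foldr min r0.length (rs.map List.length) - 1) +
                (r0.length - List.foldr min r0.length (rs.map List.length))
              = r0.length - 1 by omega] at h
          exact h.symm
        rw [hsplit, List.map_append, List.find?_append]
        cases hfB : ((List.range' 1 (List.foldr min r0.length (rs.map List.length) - 1)).map
            (pvCol (r0 :: rs))).find? (fun b => b != pvCol (r0 :: rs) 0) with
        | none =>
          exfalso
          exact List.find?_eq_none.mp hfB (pvCol (r0 :: rs) j)
            (List.mem_map_of_mem hjmem) (bne_iff_ne.mpr hjne)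
        | some s =>
          have hs : s ∈ (List.range' 1 (List.foldr min r0.length (rs.map List.length) - 1)).map
              (pvCol (r0 :: rs)) := List.mem_of_find?_eq_some hfB
          have hne : s ≠ pvCol (r0 :: rs) 0 :=
            bne_iff_ne.mp (List.find?_some (p := fun b => b != pvCol (r0 :: rs) 0) hfB)
          simp [Option.or, pv_diff_eq _ _ (pv_col_hlen _ _ s hs hne)]

-- ===== VERDICT (by name: the statement is the Claim_ definition above) =====
theorem diff_is_one_spec : Claim_equal_diff_is_one := by
  intro mirror l r horizontal _ hpre
  unfold Spec_diff_is_one diff_is_one diff_is_one_alt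
  exact pv_main (mirror.map String.toList) horizontal hpre
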